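-- pv_equiv track=rewrite | github.com/RemoNoah/Advent-Of-Code | Advent Of Code 2023/Day1/Day1Part1.py | get
-- ===== SOURCE A (Python) =====
-- def get(inputs):
--
--     results = 0
--     for input in inputs:
--         result = ""
--
--         for element in input:
--             if element.isnumeric() and element.isdecimal():
--                 result += element
--                 break
--
--         if len(result) > 0:
--             lenght = len(input)
--             while lenght > 0:
--                 element = input[lenght -1]
--                 if element.isnumeric() and element.isdecimal() :
--                     result += element
--                     break
--                 lenght -= 1
--
--             results +=int(result)
--
--     return results
-- ===== SOURCE B (Python) =====
-- def get(inputs):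
--     total = 0
--     for s in inputs:
--         digits = [c for c in s if c.isnumeric() and c.isdecimal()]
--         if digits:
--             total += int(digits[0] + digits[-1])
--     return total
-- ===== Notes on version B (the rewrite author's own statement) =====
-- stated objective: simpler
-- what changed: Replaces A's forward break-scan plus backward index while-loop per string with one forward pass collecting all digit characters and taking the first and last of that list.
import Mathlib
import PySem

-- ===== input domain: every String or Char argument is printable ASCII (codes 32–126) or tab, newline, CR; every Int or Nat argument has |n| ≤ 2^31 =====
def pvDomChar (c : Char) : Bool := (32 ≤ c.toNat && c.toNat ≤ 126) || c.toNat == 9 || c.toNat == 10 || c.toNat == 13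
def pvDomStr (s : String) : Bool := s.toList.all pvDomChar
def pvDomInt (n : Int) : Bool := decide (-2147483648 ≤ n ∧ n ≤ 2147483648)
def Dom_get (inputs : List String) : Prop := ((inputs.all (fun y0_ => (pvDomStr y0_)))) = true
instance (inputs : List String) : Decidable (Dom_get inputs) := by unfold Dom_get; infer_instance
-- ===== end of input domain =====

-- B collects each string's digit characters in one forward pass and combines the first and
-- last of that list, replacing A's forward break-scan plus backward index while-loop (simpler).


-- ===== PORT A =====
-- On the printable-ASCII domain, Python's `element.isnumeric() and element.isdecimal()`
-- holds exactly for the decimal digits '0'..'9', i.e. PySem.Chars.isdigit.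

-- `for element in input: if digit: result += element; break` — result is [] or one char
def getFirstDigit : List Char → List Char
  | [] => []
  | c :: cs => if PySem.Chars.isdigit c then [c] else getFirstDigit cs

-- `while lenght > 0: element = input[lenght-1]; if digit: result += element; break; lenght -= 1`
-- input[lenght-1] is always in range here (lenght starts at len(input)), so getD never pads.
def getBackDigit (cs : List Char) : Nat → List Char
  | 0 => []
  | Nat.succ m =>
      let c := cs.getD m ' '
      if PySem.Chars.isdigit c then [c] else getBackDigit cs m

-- body of A's outer loop: contribution of one string to `results`
-- int(result) never raises in A (result is one or two decimal digits), so getD 0 is never used.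
def getLine (cs : List Char) : Int :=
  let result := getFirstDigit cs
  if result.length > 0 then
    (PySem.Int.ofChars? (result ++ getBackDigit cs cs.length)).getD 0
  else 0

def get (inputs : List String) : Int :=
  inputs.foldl (fun results s => results + getLine s.toList) 0

-- ===== PORT B =====
-- digits = [c for c in s if c.isnumeric() and c.isdecimal()]; if digits: total += int(digits[0]+digits[-1])
def getLineAlt (cs : List Char) : Int :=
  let digits := cs.filter PySem.Chars.isdigit
  match digits.head?, digits.getLast? with
  | some a, some b => (PySem.Int.ofChars? [a, b]).getD 0
  | _, _ => 0

def get_alt (inputs : List String) : Int :=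
  inputs.foldl (fun total s => total + getLineAlt s.toList) 0

-- ===== PRECONDITION & SPEC =====
def Spec_get (inputs : List String) (out : Int) : Prop := out = get_alt inputs
instance (inputs : List String) (out : Int) : Decidable (Spec_get inputs out) := by unfold Spec_get; infer_instance

-- ===== CLAIM (what is proved, stated in full; the proofs are below) =====
def Claim_equal_get : Prop := ∀ (inputs : List String), Dom_get inputs → Spec_get inputs (get inputs)

-- ===== LEMMAS AND PROOFS =====

-- A's forward scan returns the first digit of cs (as [] or a singleton)
theorem getFirstDigit_eq (cs : List Char) :
    getFirstDigit cs = ((cs.filter PySem.Chars.isdigit).head?).toList := by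
  induction cs with
  | nil => simp [getFirstDigit]
  | cons c tl ih =>
      by_cases h : PySem.Chars.isdigit c
      · simp [getFirstDigit, h]
      · simp [getFirstDigit, h, ih]

-- A's backward scan over the first n characters returns the last digit of cs.take n
theorem getBackDigit_eq (cs : List Char) (n : Nat) (hn : n ≤ cs.length) :
    getBackDigit cs n = (((cs.take n).filter PySem.Chars.isdigit).getLast?).toList := by
  induction n with
  | zero => simp [getBackDigit]
  | succ m ih =>
      have hm : m < cs.length := hn
      have hget : cs.getD m ' ' = cs[m] := by
        simp [List.getD, List.getElem?_eq_getElem hm]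
      have ht : cs.take (m + 1) = cs.take m ++ [cs[m]] := by
        rw [List.take_add_one, List.getElem?_eq_getElem hm]; rfl
      rw [ht, List.filter_append]
      by_cases h : PySem.Chars.isdigit cs[m]
      · have hf : List.filter PySem.Chars.isdigit [cs[m]] = [cs[m]] := by
          simp [List.filter, h]
        rw [hf, List.getLast?_concat]
        simp only [getBackDigit]
        rw [hget, if_pos h]
        rfl
      · have hf : List.filter PySem.Chars.isdigit [cs[m]] = [] := by
          simp [List.filter, h]
        rw [hf, List.append_nil]
        simp only [getBackDigit]
        rw [hget, if_neg h]
        exact ih (Nat.le_of_lt hm)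

theorem getLine_eq (cs : List Char) : getLine cs = getLineAlt cs := by
  unfold getLine getLineAlt
  rw [getFirstDigit_eq, getBackDigit_eq cs cs.length (le_refl _), List.take_length]
  cases hh : (cs.filter PySem.Chars.isdigit).head? with
  | none =>
      have hnil : cs.filter PySem.Chars.isdigit = [] := List.head?_eq_none_iff.mp hh
      rw [hnil]
      rfl
  | some a =>
      have hne : cs.filter PySem.Chars.isdigit ≠ [] := by
        intro h; rw [h] at hh; simp at hh
      cases hl : (cs.filter PySem.Chars.isdigit).getLast? with
      | none => exact absurd (List.getLast?_eq_none_iff.mp hl) hne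
      | some b => simp only [hh, hl]; rfl

theorem foldl_lines_eq (inputs : List String) (acc : Int) :
    inputs.foldl (fun results s => results + getLine s.toList) acc
      = inputs.foldl (fun total s => total + getLineAlt s.toList) acc := by
  induction inputs generalizing acc with
  | nil => rfl
  | cons s tl ih => rw [List.foldl_cons, List.foldl_cons, getLine_eq]; exact ih _

-- ===== VERDICT (by name: the statement is the Claim_ definition above) =====
theorem get_spec : Claim_equal_get := by
  intro inputs _
  unfold Spec_get _root_.get get_alt
  exact foldl_lines_eq inputs 0
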